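-- pv_equiv track=rewrite | github.com/crzwdjk/uniterm | font/pack_data.py | adjust_block
-- ===== SOURCE A (Python) =====
-- def ctz(i):
--     if i == 0: return 0
--     cnt = 0
--     while i & 1 == 0:
--         cnt += 1
--         i >>= 1
--     return cnt
--
-- def adjust_block(start, end):
--     blocks = []
--     blocksize = 1 << ctz(start)
--     while start + blocksize <= end:
--         blocks.append((start, blocksize))
--         start += blocksize
--         blocksize = 1 << ctz(start)
--     blocksize >>= 1
--     while blocksize > 0:
--         if start + blocksize <= end:
--             blocks.append((start, blocksize))
--             start += blocksize
--         blocksize >>= 1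
--     return blocks
-- ===== SOURCE B (Python) =====
-- def ctz(i):
--     if i == 0: return 0
--     cnt = 0
--     while i & 1 == 0:
--         cnt += 1
--         i >>= 1
--     return cnt
--
-- def adjust_block(start, end):
--     # single greedy pass: block size = min(alignment of start, largest power of two <= remaining)
--     blocks = []
--     while start < end:
--         size = min(1 << ctz(start), 1 << ((end - start).bit_length() - 1))
--         blocks.append((start, size))
--         start += size
--     return blocks
-- ===== Notes on version B (the rewrite author's own statement) =====
-- stated objective: simpler
-- what changed: A's two separate phases (grow blocks by alignment, then shrink by halving) are replaced by one greedy loop whose block size is min(alignment of start, largest power of two fitting in the remainder).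
import Mathlib
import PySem

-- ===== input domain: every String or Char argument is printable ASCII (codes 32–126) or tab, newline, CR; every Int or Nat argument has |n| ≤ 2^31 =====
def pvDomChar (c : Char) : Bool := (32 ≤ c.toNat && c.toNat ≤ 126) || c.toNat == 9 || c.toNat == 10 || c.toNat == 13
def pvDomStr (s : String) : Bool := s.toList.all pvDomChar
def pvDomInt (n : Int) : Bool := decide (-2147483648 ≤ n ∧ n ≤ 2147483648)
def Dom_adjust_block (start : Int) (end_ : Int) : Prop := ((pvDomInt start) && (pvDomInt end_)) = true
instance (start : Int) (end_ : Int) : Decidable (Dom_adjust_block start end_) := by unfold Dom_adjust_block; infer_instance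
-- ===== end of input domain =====

-- B replaces A's two-phase decomposition (grow by alignment, then shrink by halving) with one
-- greedy loop: block size = min(alignment of start, largest power of two ≤ remaining length).

-- ===== PORT A =====
-- `ctz` is shared: Source A and Source B contain the identical helper.
-- termination helper for ctzLoop, cited by name in decreasing_by
theorem pvCtzHalfLt (i : Int) (h0 : i ≠ 0) (he : PySem.Int.band i 1 = 0) :
    (i >>> (1:Nat)).natAbs < i.natAbs := by
  rw [PySem.Int.band_one] at he
  rw [(PySem.Int.mod_eq_zero_iff_dvd i 2)] at he
  rw [Int.shiftRight_eq_div_pow]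
  obtain ⟨b, rfl⟩ := he
  omega

-- `i & 1 == 0` is `PySem.Int.band i 1 = 0`; `i >>= 1` is `i >>> 1` (Python-exact floor shift).
-- The `i ≠ 0` conjunct only makes the recursion total: `ctz` never calls the loop with 0,
-- and halving an even nonzero int is nonzero, so the conjunct never changes a computed value.
def ctzLoop (i : Int) (cnt : Int) : Int :=
  if h : PySem.Int.band i 1 = 0 ∧ i ≠ 0 then ctzLoop (i >>> (1:Nat)) (cnt + 1) else cnt
termination_by i.natAbs
decreasing_by exact pvCtzHalfLt i h.2 h.1

def ctz (i : Int) : Int :=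
  if i = 0 then 0 else ctzLoop i 0

-- termination helper for the loops, cited by name in decreasing_by
theorem pvOneShl (k : Nat) : (1:Int) <<< k = 2 ^ k := by
  simp [Int.shiftLeft_eq]

theorem pvOneShlPos (k : Nat) : 0 < (1:Int) <<< k := by
  rw [pvOneShl]; positivity

-- first while loop of A; `1 << ctz(start)` is `1 <<< (ctz start).toNat` (ctz is ≥ 0, so toNat is exact)
def loop1 (start : Int) (end_ : Int) (blocks : List (Int × Int)) : List (Int × Int) × Int × Int :=
  let blocksize := (1:Int) <<< (ctz start).toNat
  if start + blocksize ≤ end_ then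
    loop1 (start + blocksize) end_ (blocks ++ [(start, blocksize)])
  else (blocks, start, blocksize)
termination_by (end_ - start).toNat
decreasing_by have := pvOneShlPos (ctz start).toNat; omega

-- second while loop of A; `blocksize >>= 1` is `>>> 1`
def loop2 (start : Int) (end_ : Int) (blocksize : Int) (blocks : List (Int × Int)) : List (Int × Int) :=
  if blocksize > 0 then
    if start + blocksize ≤ end_ then
      loop2 (start + blocksize) end_ (blocksize >>> (1:Nat)) (blocks ++ [(start, blocksize)])
    else
      loop2 start end_ (blocksize >>> (1:Nat)) blocks
  else blocks
termination_by blocksize.toNat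
decreasing_by all_goals (rw [Int.shiftRight_eq_div_pow]; omega)

def adjust_block (start : Int) (end_ : Int) : List (Int × Int) :=
  let r := loop1 start end_ []
  loop2 r.2.1 end_ (r.2.2 >>> (1:Nat)) r.1

-- ===== PORT B =====
-- `(end - start).bit_length()` is `PySem.Int.bitLength (end_ - start)` (Python-exact)
def loopB (start : Int) (end_ : Int) (blocks : List (Int × Int)) : List (Int × Int) :=
  if start < end_ then
    let size := min ((1:Int) <<< (ctz start).toNat)
                    ((1:Int) <<< (PySem.Int.bitLength (end_ - start) - 1))
    loopB (start + size) end_ (blocks ++ [(start, size)])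
  else blocks
termination_by (end_ - start).toNat
decreasing_by
  have h1 := pvOneShlPos (ctz start).toNat
  have h2 := pvOneShlPos (PySem.Int.bitLength (end_ - start) - 1)
  have h3 := lt_min h1 h2
  omega

def adjust_block_alt (start : Int) (end_ : Int) : List (Int × Int) :=
  loopB start end_ []

-- ===== PRECONDITION & SPEC =====
def Spec_adjust_block (start : Int) (end_ : Int) (out : List (Int × Int)) : Prop := out = adjust_block_alt start end_
instance (start : Int) (end_ : Int) (out : List (Int × Int)) : Decidable (Spec_adjust_block start end_ out) := by unfold Spec_adjust_block; infer_instance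

-- ===== CLAIM (what is proved, stated in full; the proofs are below) =====
def Claim_equal_adjust_block : Prop := ∀ (start : Int) (end_ : Int), Dom_adjust_block start end_ → Spec_adjust_block start end_ (adjust_block start end_)

-- ===== LEMMAS AND PROOFS =====

theorem pvShrPow (k : Nat) : ((2:Int) ^ (k + 1)) >>> (1:Nat) = 2 ^ k := by
  rw [Int.shiftRight_eq_div_pow, pow_succ]
  simp

-- the loop of ctz computes the 2-adic valuation: result = cnt + k with 2^k the largest power of 2 dividing i
theorem ctzLoop_spec (n : Nat) : ∀ (i : Int), i.natAbs ≤ n → ∀ (cnt : Int), i ≠ 0 →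
    ∃ k : Nat, ctzLoop i cnt = cnt + (k : Int) ∧ ((2:Int) ^ k ∣ i) ∧ ¬ ((2:Int) ^ (k + 1) ∣ i) := by
  induction n with
  | zero => intro i hi cnt h0; omega
  | succ n ih =>
    intro i hi cnt h0
    rw [ctzLoop]
    by_cases hb : PySem.Int.band i 1 = 0
    · have hdvd : (2:Int) ∣ i := by
        rw [PySem.Int.band_one, PySem.Int.mod_eq_zero_iff_dvd] at hb; exact hb
      obtain ⟨b, rfl⟩ := hdvd
      have hb0 : b ≠ 0 := by rintro rfl; simp at h0
      have hshift : (2 * b) >>> (1:Nat) = b := by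
        rw [Int.shiftRight_eq_div_pow]; simp
      simp only [hb, h0, ne_eq, not_false_eq_true, and_self, hshift]
      obtain ⟨k, hk, hdv, hnd⟩ := ih b (by omega) (cnt + 1) hb0
      refine ⟨k + 1, by rw [hk]; push_cast; ring, ?_, ?_⟩
      · rw [pow_succ, mul_comm]
        exact mul_dvd_mul_left 2 hdv
      · intro hcon
        apply hnd
        rw [pow_succ, mul_comm ((2:Int) ^ (k + 1)) 2] at hcon
        exact (mul_dvd_mul_iff_left (by norm_num : (2:Int) ≠ 0)).mp hcon
    · simp only [hb, false_and, dite_false]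
      refine ⟨0, by simp, by simp, ?_⟩
      rw [PySem.Int.band_one] at hb
      rw [pow_one]
      exact fun hc => hb ((PySem.Int.mod_eq_zero_iff_dvd i 2).mpr hc)

-- ctz of a nonzero integer names the exponent of its largest power-of-two divisor
theorem ctz_spec (i : Int) (h0 : i ≠ 0) :
    ∃ k : Nat, (ctz i).toNat = k ∧ ((2:Int) ^ k ∣ i) ∧ ¬ ((2:Int) ^ (k + 1) ∣ i) := by
  obtain ⟨k, hk, hdv, hnd⟩ := ctzLoop_spec i.natAbs i le_rfl 0 h0
  refine ⟨k, ?_, hdv, hnd⟩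
  unfold ctz
  rw [if_neg h0, hk]
  omega

theorem ctz_zero : ctz 0 = 0 := by unfold ctz; simp

-- the alignment of a nonzero start is the largest power of two dividing it
theorem le_align (start : Int) (j : Nat) (h0 : start ≠ 0) (h : (2:Int) ^ j ∣ start) :
    (2:Int) ^ j ≤ (1:Int) <<< (ctz start).toNat := by
  obtain ⟨k, hk, _, hnd⟩ := ctz_spec start h0
  rw [hk, pvOneShl]
  have hjk : j ≤ k := by
    by_contra hlt
    exact hnd (dvd_trans (pow_dvd_pow 2 (by omega)) h)
  exact pow_le_pow_right₀ (by norm_num) hjk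

-- 2^k ≤ d < 2^(k+1) pins down 1 << (d.bit_length() - 1)
theorem maxp_eq (d : Int) (k : Nat) (h1 : (2:Int) ^ k ≤ d) (h2 : d < 2 ^ (k + 1)) :
    (1:Int) <<< (PySem.Int.bitLength d - 1) = 2 ^ k := by
  have hd0 : 0 < d := lt_of_lt_of_le (by positivity) h1
  have hlo : 2 ^ k ≤ d.natAbs := by
    have : ((2 ^ k : Nat) : Int) ≤ d := by push_cast; exact h1
    omega
  have hhi : d.natAbs < 2 ^ (k + 1) := by
    have : d < ((2 ^ (k + 1) : Nat) : Int) := by push_cast; exact h2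
    omega
  have hne : d ≠ 0 := by omega
  have hB1 := PySem.Int.two_pow_bitLength_le d hne
  have hB2 := PySem.Int.lt_two_pow_bitLength d
  have hBk : PySem.Int.bitLength d - 1 = k := by
    have hk_lt : k < PySem.Int.bitLength d :=
      (Nat.pow_lt_pow_iff_right (by norm_num)).mp (lt_of_le_of_lt hlo hB2)
    have hB_le : PySem.Int.bitLength d - 1 < k + 1 :=
      (Nat.pow_lt_pow_iff_right (by norm_num)).mp (lt_of_le_of_lt hB1 hhi)
    omega
  rw [hBk, pvOneShl]

-- any power of two ≤ d is ≤ 1 << (d.bit_length() - 1)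
theorem pow_le_maxp (d : Int) (j : Nat) (h : (2:Int) ^ j ≤ d) :
    (2:Int) ^ j ≤ (1:Int) <<< (PySem.Int.bitLength d - 1) := by
  have hd0 : 0 < d := lt_of_lt_of_le (by positivity) h
  have hlo : 2 ^ j ≤ d.natAbs := by
    have : ((2 ^ j : Nat) : Int) ≤ d := by push_cast; exact h
    omega
  have hB2 := PySem.Int.lt_two_pow_bitLength d
  have hj : j ≤ PySem.Int.bitLength d - 1 := by
    have : j < PySem.Int.bitLength d :=
      (Nat.pow_lt_pow_iff_right (by norm_num)).mp (lt_of_le_of_lt hlo hB2)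
    omega
  rw [pvOneShl]
  exact pow_le_pow_right₀ (by norm_num) hj

theorem loopB_stop (start end_ : Int) (blocks : List (Int × Int)) (h : ¬ start < end_) :
    loopB start end_ blocks = blocks := by
  rw [loopB]; simp [h]

theorem loopB_step (start end_ : Int) (blocks : List (Int × Int)) (h : start < end_) :
    loopB start end_ blocks =
      loopB (start + min ((1:Int) <<< (ctz start).toNat) ((1:Int) <<< (PySem.Int.bitLength (end_ - start) - 1))) end_
        (blocks ++ [(start, min ((1:Int) <<< (ctz start).toNat) ((1:Int) <<< (PySem.Int.bitLength (end_ - start) - 1)))]) := by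
  conv_lhs => rw [loopB]
  simp [h]

-- phase 2 of A agrees with B's loop under the invariant it enters with:
-- start is a nonzero multiple of 2^(k+1) and less than 2^(k+1) remains
theorem loop2_eq_loopB (k : Nat) : ∀ (start end_ : Int) (blocks : List (Int × Int)),
    start ≠ 0 → ((2:Int) ^ (k + 1)) ∣ start → end_ - start < 2 ^ (k + 1) →
    loop2 start end_ (2 ^ k) blocks = loopB start end_ blocks := by
  induction k with
  | zero =>
    intro start end_ blocks h0 hdvd hlt
    have hlt2 : end_ - start < 2 := by norm_num at hlt; omega
    by_cases hf : start + 1 ≤ end_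
    · have hsz : min ((1:Int) <<< (ctz start).toNat) ((1:Int) <<< (PySem.Int.bitLength (end_ - start) - 1)) = 1 := by
        have hm : (1:Int) <<< (PySem.Int.bitLength (end_ - start) - 1) = 1 := by
          have := maxp_eq (end_ - start) 0 (by omega) (by norm_num; omega)
          simpa using this
        have := pvOneShlPos (ctz start).toNat
        omega
      rw [loop2]
      norm_num
      rw [if_pos (by omega : start < end_)]
      have h01 : ((1:Int)) >>> (1:Nat) = 0 := by decide
      rw [h01, loop2]
      norm_num
      rw [loopB_step start end_ blocks (by omega), hsz,
          loopB_stop _ _ _ (by omega)]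
    · rw [loop2]
      norm_num
      rw [if_neg (by omega : ¬ start < end_)]
      have h01 : ((1:Int)) >>> (1:Nat) = 0 := by decide
      rw [h01, loop2]
      norm_num
      rw [loopB_stop _ _ _ (by omega)]
  | succ k ih =>
    intro start end_ blocks h0 hdvd hlt
    have hp : (0:Int) < 2 ^ (k + 1) := by positivity
    have hpow : (2:Int) ^ (k + 1 + 1) = 2 * 2 ^ (k + 1) := by ring
    rw [loop2, if_pos hp]
    by_cases hf : start + 2 ^ (k + 1) ≤ end_
    · rw [if_pos hf, pvShrPow]
      have hsz : min ((1:Int) <<< (ctz start).toNat) ((1:Int) <<< (PySem.Int.bitLength (end_ - start) - 1)) = 2 ^ (k + 1) := by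
        have hmax : (1:Int) <<< (PySem.Int.bitLength (end_ - start) - 1) = 2 ^ (k + 1) :=
          maxp_eq (end_ - start) (k + 1) (by omega) (by omega)
        have halign : (2:Int) ^ (k + 1 + 1) ≤ (1:Int) <<< (ctz start).toNat :=
          le_align start (k + 1 + 1) h0 hdvd
        omega
      rw [loopB_step start end_ blocks (by omega), hsz]
      have h0' : start + 2 ^ (k + 1) ≠ 0 := by
        rintro h
        have hdd : (2:Int) ^ (k + 1 + 1) ∣ 2 ^ (k + 1) := by
          have hs : start = -(2 ^ (k + 1)) := by omega
          rw [hs] at hdvd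
          exact dvd_neg.mp hdvd
        have := Int.le_of_dvd (by positivity) hdd
        omega
      have hdvd' : (2:Int) ^ (k + 1) ∣ start + 2 ^ (k + 1) :=
        dvd_add (dvd_trans (pow_dvd_pow 2 (by omega)) hdvd) dvd_rfl
      exact ih (start + 2 ^ (k + 1)) end_ (blocks ++ [(start, 2 ^ (k + 1))]) h0' hdvd' (by omega)
    · rw [if_neg hf, pvShrPow]
      exact ih start end_ blocks h0 (dvd_trans (pow_dvd_pow 2 (by omega)) hdvd) (by omega)

-- A's first loop followed by its second agrees with B's single loop
theorem loop1_loop2_eq_loopB (n : Nat) : ∀ (start end_ : Int) (blocks : List (Int × Int)),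
    (end_ - start).toNat ≤ n →
    loop2 (loop1 start end_ blocks).2.1 end_ ((loop1 start end_ blocks).2.2 >>> (1:Nat)) (loop1 start end_ blocks).1
      = loopB start end_ blocks := by
  induction n using Nat.strong_induction_on with
  | _ n ih =>
    intro start end_ blocks hn
    rw [loop1]
    by_cases hf : start + (1:Int) <<< (ctz start).toNat ≤ end_
    · rw [if_pos hf]
      have hpos := pvOneShlPos (ctz start).toNat
      have hd : (end_ - (start + (1:Int) <<< (ctz start).toNat)).toNat < n := by omega
      rw [ih _ hd (start + (1:Int) <<< (ctz start).toNat) end_ (blocks ++ [(start, (1:Int) <<< (ctz start).toNat)]) le_rfl]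
      have hsz : min ((1:Int) <<< (ctz start).toNat) ((1:Int) <<< (PySem.Int.bitLength (end_ - start) - 1)) = (1:Int) <<< (ctz start).toNat := by
        have h2 : ((1:Int) <<< (ctz start).toNat) ≤ (1:Int) <<< (PySem.Int.bitLength (end_ - start) - 1) := by
          rw [pvOneShl]
          exact pow_le_maxp (end_ - start) (ctz start).toNat (by rw [← pvOneShl]; omega)
        exact min_eq_left h2
      rw [loopB_step start end_ blocks (by omega), hsz]
    · rw [if_neg hf]
      rcases Nat.eq_zero_or_eq_succ_pred (ctz start).toNat with hm | hm
      · -- alignment 1: A's second loop gets blocksize 0 and B's loop does not run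
        rw [hm] at hf ⊢
        have h1 : ((1:Int) <<< (0:Nat)) = 1 := by decide
        rw [h1] at hf ⊢
        have h01 : ((1:Int)) >>> (1:Nat) = 0 := by decide
        rw [h01, loop2]
        norm_num
        rw [loopB_stop _ _ _ (by omega)]
      · -- alignment 2^(k+1): phase-2 invariant holds
        set k := (ctz start).toNat - 1 with hkdef
        have hm' : (ctz start).toNat = k + 1 := by omega
        have h0 : start ≠ 0 := by
          rintro rfl
          rw [ctz_zero] at hm'
          simp at hm'
        obtain ⟨k0, hk0, hdv, _⟩ := ctz_spec start h0
        have hk0' : k0 = k + 1 := by omega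
        rw [hm', pvOneShl] at hf ⊢
        rw [pvShrPow]
        exact loop2_eq_loopB k start end_ blocks h0 (hk0' ▸ hdv) (by omega)

-- ===== VERDICT (by name: the statement is the Claim_ definition above) =====
theorem adjust_block_spec : Claim_equal_adjust_block := by
  intro start end_ _
  unfold Spec_adjust_block adjust_block adjust_block_alt
  exact loop1_loop2_eq_loopB (end_ - start).toNat start end_ [] le_rfl
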